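-- pv_equiv track=rewrite | github.com/FraysaXII/openclaw-akos | akos/hlk_process_csv.py | build_unique_item_name_to_id
-- ===== SOURCE A (Python) =====
-- from collections import defaultdict
--
-- def ambiguous_item_names(rows: list[dict[str, str]]) -> set[str]:
--     """item_name values that map to more than one item_id (registry tech debt)."""
--     groups: dict[str, set[str]] = defaultdict(set)
--     for row in rows:
--         name = (row.get("item_name") or "").strip()
--         iid = (row.get("item_id") or "").strip()
--         if name and iid:
--             groups[name].add(iid)
--     return {n for n, ids in groups.items() if len(ids) > 1}
--
-- def build_unique_item_name_to_id(rows: list[dict[str, str]]) -> dict[str, str]: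
--     """Map item_name -> item_id only when that name is unique across the file."""
--     amb = ambiguous_item_names(rows)
--     out: dict[str, str] = {}
--     for row in rows:
--         name = (row.get("item_name") or "").strip()
--         iid = (row.get("item_id") or "").strip()
--         if not name or not iid or name in amb:
--             continue
--         out[name] = iid
--     return out
-- ===== SOURCE B (Python) =====
-- def build_unique_item_name_to_id(rows: list[dict[str, str]]) -> dict[str, str]:
--     """Map item_name -> item_id only when that name is unique across the file.
--
--     One pass builds name -> set-of-ids; a single comprehension over that table
--     keeps exactly the names with one id (no separate ambiguity scan of rows).
--     """
--     groups: dict[str, set[str]] = {}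
--     for row in rows:
--         name = (row.get("item_name") or "").strip()
--         iid = (row.get("item_id") or "").strip()
--         if name and iid:
--             groups.setdefault(name, set()).add(iid)
--     return {name: next(iter(ids)) for name, ids in groups.items() if len(ids) == 1}
-- ===== Notes on version B (the rewrite author's own statement) =====
-- stated objective: simpler
-- what changed: B drops the separate ambiguous_item_names helper and its second scan over rows: one pass builds a name->set-of-ids table, and the result is a single comprehension over that table (names with exactly one id), instead of recomputing name/iid per row in a second output loop guarded by the ambiguity set.
import Mathlib
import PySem

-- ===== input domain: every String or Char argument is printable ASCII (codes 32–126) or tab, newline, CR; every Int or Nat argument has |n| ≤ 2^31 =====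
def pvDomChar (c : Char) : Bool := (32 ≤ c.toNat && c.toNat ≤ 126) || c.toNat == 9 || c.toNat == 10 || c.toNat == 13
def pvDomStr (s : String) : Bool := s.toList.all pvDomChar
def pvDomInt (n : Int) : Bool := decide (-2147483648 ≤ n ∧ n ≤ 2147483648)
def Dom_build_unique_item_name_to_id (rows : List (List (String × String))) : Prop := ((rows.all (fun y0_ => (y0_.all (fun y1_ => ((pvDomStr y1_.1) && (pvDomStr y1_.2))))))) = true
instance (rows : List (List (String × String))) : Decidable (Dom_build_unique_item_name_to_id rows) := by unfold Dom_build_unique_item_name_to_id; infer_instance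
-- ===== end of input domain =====

-- B replaces A's two scans over rows (ambiguity set, then output loop) by ONE pass building a
-- name -> set-of-ids table and a single filter over that table; objective: simpler.

-- ===== PORT A =====
-- (row.get(k) or "").strip(); on strings 'x or ""' is the identity, so getD k "" is exact
def pvFieldA (row : List (String × String)) (k : String) : String :=
  PySem.Str.strip ((PySem.Dict.mk row).getD k "")

-- loop body of ambiguous_item_names: groups[name].add(iid) on a defaultdict(set)
def pvGroupsStepA (g : PySem.Dict String (PySem.Set String)) (row : List (String × String)) :
    PySem.Dict String (PySem.Set String) :=
  if pvFieldA row "item_name" ≠ "" ∧ pvFieldA row "item_id" ≠ "" then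
    g.insert (pvFieldA row "item_name")
      (PySem.Set.add (g.getD (pvFieldA row "item_name") PySem.Set.empty) (pvFieldA row "item_id"))
  else g

-- {n for n, ids in groups.items() if len(ids) > 1}; only membership in this set is used below
def ambiguous_item_names (rows : List (List (String × String))) : PySem.Set String :=
  let groups := rows.foldl pvGroupsStepA PySem.Dict.empty
  PySem.Set.ofList (groups.items.filterMap (fun p => if 1 < PySem.Set.len p.2 then some p.1 else none))

-- loop body of A's output loop
def pvOutStepA (amb : PySem.Set String) (out : PySem.Dict String String) (row : List (String × String)) :
    PySem.Dict String String :=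
  if pvFieldA row "item_name" = "" ∨ pvFieldA row "item_id" = "" ∨
      PySem.Set.contains amb (pvFieldA row "item_name") then out
  else out.insert (pvFieldA row "item_name") (pvFieldA row "item_id")

def build_unique_item_name_to_id (rows : List (List (String × String))) : List (String × String) :=
  (rows.foldl (pvOutStepA (ambiguous_item_names rows)) PySem.Dict.empty).items

-- ===== PORT B =====
def pvFieldB (row : List (String × String)) (k : String) : String :=
  PySem.Str.strip ((PySem.Dict.mk row).getD k "")

-- groups.setdefault(name, set()).add(iid)  ==  groups[name] = groups.get(name, set()) | {iid}
def pvGroupsStepB (g : PySem.Dict String (PySem.Set String)) (row : List (String × String)) :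
    PySem.Dict String (PySem.Set String) :=
  if pvFieldB row "item_name" ≠ "" ∧ pvFieldB row "item_id" ≠ "" then
    PySem.Dict.modify g (pvFieldB row "item_name") PySem.Set.empty
      (fun s => PySem.Set.add s (pvFieldB row "item_id"))
  else g

-- {name: next(iter(ids)) for name, ids in groups.items() if len(ids) == 1}: group keys are distinct,
-- so the comprehension's items are exactly this filterMap; next(iter(ids)) on the singleton set is
-- its sole element (order-independent)
def build_unique_item_name_to_id_alt (rows : List (List (String × String))) : List (String × String) :=
  let groups := rows.foldl pvGroupsStepB PySem.Dict.empty
  groups.items.filterMap (fun p => if PySem.Set.len p.2 = 1 then some (p.1, p.2.headI) else none)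

-- ===== PRECONDITION & SPEC =====
def Spec_build_unique_item_name_to_id (rows : List (List (String × String))) (out : List (String × String)) : Prop := out = build_unique_item_name_to_id_alt rows
instance (rows : List (List (String × String))) (out : List (String × String)) : Decidable (Spec_build_unique_item_name_to_id rows out) := by unfold Spec_build_unique_item_name_to_id; infer_instance

-- ===== CLAIM (what is proved, stated in full; the proofs are below) =====
def Claim_equal_build_unique_item_name_to_id : Prop := ∀ (rows : List (List (String × String))), Dom_build_unique_item_name_to_id rows → Spec_build_unique_item_name_to_id rows (build_unique_item_name_to_id rows)

-- ===== LEMMAS AND PROOFS =====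

-- picks a (name, id) from a group entry iff the name is not ambiguous (invariant form)
def pvPickAmb (amb : PySem.Set String) (p : String × PySem.Set String) : Option (String × String) :=
  if PySem.Set.contains amb p.1 then none else some (p.1, p.2.headI)

-- invariant carried for the groups dict: distinct keys, every stored set nonempty and duplicate-free
def pvGInv (g : PySem.Dict String (PySem.Set String)) : Prop :=
  g.keys.Nodup ∧ ∀ p ∈ g.items, p.2 ≠ [] ∧ p.2.Nodup

theorem pvStepB_eq_StepA : pvGroupsStepB = pvGroupsStepA := by
  funext g row; rfl

theorem pvSet_subset_add (s : PySem.Set String) (x : String) : s ⊆ PySem.Set.add s x := by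
  unfold PySem.Set.add; split <;> simp

theorem pvSet_mem_add_self (s : PySem.Set String) (x : String) : x ∈ PySem.Set.add s x := by
  simp [PySem.Set.mem_add]

theorem pvSet_add_ne_nil (s : PySem.Set String) (x : String) : PySem.Set.add s x ≠ [] := by
  unfold PySem.Set.add
  split
  · rename_i hc; intro hnil; subst hnil; simp [PySem.Set.contains] at hc
  · simp

theorem pvSet_add_nodup (s : PySem.Set String) (x : String) (h : s.Nodup) :
    (PySem.Set.add s x).Nodup := by
  unfold PySem.Set.add PySem.Set.contains
  split
  · exact h
  · rename_i hx
    simp only [List.contains_iff_mem] at hx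
    simp only [List.nodup_append, List.nodup_singleton, true_and, h]
    simpa using fun a ha (he : a = x) => hx (he ▸ ha)

theorem pvSet_add_of_mem (s : PySem.Set String) (x : String) (h : x ∈ s) :
    PySem.Set.add s x = s := by
  simp [PySem.Set.add, PySem.Set.contains, h]

theorem pvGInv_step (g : PySem.Dict String (PySem.Set String)) (row : List (String × String))
    (h : pvGInv g) : pvGInv (pvGroupsStepA g row) := by
  obtain ⟨hk, hs⟩ := h
  unfold pvGroupsStepA
  split
  · constructor
    · exact PySem.Dict.nodup_keys_insert _ _ _ hk
    · intro p hp
      rcases (PySem.Dict.mem_items_insert _ _ _ _).1 hp with rfl | ⟨hp', _⟩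
      · refine ⟨pvSet_add_ne_nil _ _, pvSet_add_nodup _ _ ?_⟩
        by_cases hc : g.contains (pvFieldA row "item_name") = true
        · have hi : (g.get? (pvFieldA row "item_name")).isSome := by
            rw [← PySem.Dict.contains_eq_isSome_get?]; exact hc
          rcases Option.isSome_iff_exists.1 hi with ⟨v, hv⟩
          rw [PySem.Dict.getD_of_get?_eq_some g PySem.Set.empty hv]
          exact (hs _ (PySem.Dict.mem_items_of_get?_eq_some g hv)).2
        · rw [PySem.Dict.getD_of_not_contains g PySem.Set.empty (by simpa using hc)]
          exact List.nodup_nil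
      · exact hs _ hp'
  · exact ⟨hk, hs⟩

theorem pvGInv_foldl (l : List (List (String × String))) (g : PySem.Dict String (PySem.Set String))
    (h : pvGInv g) : pvGInv (l.foldl pvGroupsStepA g) := by
  induction l generalizing g with
  | nil => exact h
  | cons r l ih => exact ih _ (pvGInv_step _ _ h)

theorem pvMono_step (g : PySem.Dict String (PySem.Set String)) (row : List (String × String))
    (n : String) : g.getD n PySem.Set.empty ⊆ (pvGroupsStepA g row).getD n PySem.Set.empty := by
  unfold pvGroupsStepA
  split
  · rw [PySem.Dict.getD_insert]
    split
    · rename_i hn; subst hn; exact pvSet_subset_add _ _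
    · exact fun _ h => h
  · exact fun _ h => h

theorem pvMono_foldl (l : List (List (String × String))) (g : PySem.Dict String (PySem.Set String))
    (n : String) : g.getD n PySem.Set.empty ⊆ (l.foldl pvGroupsStepA g).getD n PySem.Set.empty := by
  induction l generalizing g with
  | nil => exact fun _ h => h
  | cons r l ih => exact fun x hx => ih (pvGroupsStepA g r) (pvMono_step g r n hx)

-- the key list of a pickAmb-filtered items list is a sublist of the original key list
theorem pvKeys_filterMap (amb : PySem.Set String) (l : List (String × PySem.Set String)) :
    ((l.filterMap (pvPickAmb amb)).map Prod.fst).Sublist (l.map Prod.fst) := by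
  induction l with
  | nil => simp
  | cons p l ih =>
    by_cases h : PySem.Set.contains amb p.1 = true
    · simp only [List.filterMap_cons, pvPickAmb]
      rw [if_pos h]
      exact ih.cons _
    · simp only [List.filterMap_cons, pvPickAmb]
      rw [if_neg h]
      simp only [List.map_cons]
      exact ih.cons₂ _

theorem pvInsert_self_of_mem_items {κ ν : Type} [BEq κ] [LawfulBEq κ]
    (d : PySem.Dict κ ν) (k : κ) (v : ν)
    (hnd : d.keys.Nodup) (h : (k, v) ∈ d.items) : d.insert k v = d := by
  have hc : d.contains k = true :=
    (PySem.Dict.contains_iff_mem_keys d k).2 (PySem.Dict.mem_keys_of_mem_items d h)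
  apply PySem.Dict.ext
  rw [PySem.Dict.items_insert_of_contains d v hc]
  have hmap : ∀ p ∈ d.items, (if (p.1 == k) = true then (k, v) else p) = id p := by
    intro p hp
    by_cases hb : (p.1 == k) = true
    · have hk : p.1 = k := by simpa using hb
      have h1 : d.getD k v = v := PySem.Dict.getD_of_mem_items d h hnd v
      have h2 : d.getD p.1 v = p.2 := by
        rcases p with ⟨a, b⟩; exact PySem.Dict.getD_of_mem_items d hp hnd v
      rw [if_pos hb]
      simp only [id]
      rw [hk] at h2
      exact Prod.ext hk.symm (by rw [← h1, h2])
    · rw [if_neg hb]; rfl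
  rw [List.map_congr_left hmap, List.map_id]

-- inserting a key from amb does not change the pickAmb-filtered items
theorem pvFilterMap_insert_amb (amb : PySem.Set String) (g : PySem.Dict String (PySem.Set String))
    (name : String) (v : PySem.Set String) (ha : PySem.Set.contains amb name = true) :
    (g.insert name v).items.filterMap (pvPickAmb amb) = g.items.filterMap (pvPickAmb amb) := by
  have hm : name ∈ amb := by
    simpa [PySem.Set.contains, List.contains_iff_mem] using ha
  by_cases hc : g.contains name = true
  · rw [PySem.Dict.items_insert_of_contains g v hc, List.filterMap_map]
    apply List.filterMap_congr
    intro p hp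
    by_cases hb : (p.1 == name) = true
    · have hk : p.1 = name := by simpa using hb
      simp [Function.comp, pvPickAmb, hm, hk]
    · simp [Function.comp, hb, pvPickAmb]
  · rw [PySem.Dict.items_insert_of_not_contains g v (by simpa using hc), List.filterMap_append]
    simp [pvPickAmb, hm]

-- MAIN: A's output loop, started from any state consistent with the groups state, lands on the
-- pickAmb filter of the final groups table
theorem pvMain (gf : PySem.Dict String (PySem.Set String)) (amb : PySem.Set String)
    (hamb : ∀ n, PySem.Set.contains amb n = false → (gf.getD n PySem.Set.empty).length ≤ 1)
    (l : List (List (String × String))) (g : PySem.Dict String (PySem.Set String))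
    (o : PySem.Dict String String) (hg : pvGInv g)
    (ho : o.items = g.items.filterMap (pvPickAmb amb))
    (hgf : l.foldl pvGroupsStepA g = gf) :
    (l.foldl (pvOutStepA amb) o).items = gf.items.filterMap (pvPickAmb amb) := by
  induction l generalizing g o with
  | nil =>
    simp only [List.foldl_nil] at hgf ⊢
    rw [← hgf]; exact ho
  | cons r l ih =>
    simp only [List.foldl_cons] at hgf ⊢
    by_cases hval : pvFieldA r "item_name" ≠ "" ∧ pvFieldA r "item_id" ≠ ""
    · by_cases ha : PySem.Set.contains amb (pvFieldA r "item_name") = true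
      · -- valid row, ambiguous name: output loop skips, groups entry stays filtered out
        have hout : pvOutStepA amb o r = o := by
          unfold pvOutStepA; rw [if_pos (Or.inr (Or.inr ha))]
        have hgstep : pvGroupsStepA g r
            = g.insert (pvFieldA r "item_name")
                (PySem.Set.add (g.getD (pvFieldA r "item_name") PySem.Set.empty)
                  (pvFieldA r "item_id")) := by
          unfold pvGroupsStepA; rw [if_pos hval]
        rw [hout]
        refine ih (pvGroupsStepA g r) o (pvGInv_step g r hg) ?_ hgf
        rw [hgstep, pvFilterMap_insert_amb amb g _ _ ha]; exact ho
      · -- valid row, non-ambiguous name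
        have ham : pvFieldA r "item_name" ∉ amb := by
          simpa [PySem.Set.contains] using ha
        have hout : pvOutStepA amb o r
            = o.insert (pvFieldA r "item_name") (pvFieldA r "item_id") := by
          unfold pvOutStepA; rw [if_neg (by simp [hval.1, hval.2, ham, PySem.Set.contains])]
        have hgi : (pvGroupsStepA g r).getD (pvFieldA r "item_name") PySem.Set.empty
            = PySem.Set.add (g.getD (pvFieldA r "item_name") PySem.Set.empty)
                (pvFieldA r "item_id") := by
          unfold pvGroupsStepA
          rw [if_pos hval, PySem.Dict.getD_insert, if_pos rfl]
        have hsub : PySem.Set.add (g.getD (pvFieldA r "item_name") PySem.Set.empty)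
            (pvFieldA r "item_id") ⊆ gf.getD (pvFieldA r "item_name") PySem.Set.empty := by
          rw [← hgi, ← hgf]
          exact pvMono_foldl l (pvGroupsStepA g r) (pvFieldA r "item_name")
        have hlen : (gf.getD (pvFieldA r "item_name") PySem.Set.empty).length ≤ 1 :=
          hamb _ (by simpa using ha)
        have hiidmem : pvFieldA r "item_id" ∈ gf.getD (pvFieldA r "item_name") PySem.Set.empty :=
          hsub (pvSet_mem_add_self _ _)
        have hgfs : gf.getD (pvFieldA r "item_name") PySem.Set.empty = [pvFieldA r "item_id"] := by
          rcases hq : gf.getD (pvFieldA r "item_name") PySem.Set.empty with _ | ⟨x, t⟩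
          · rw [hq] at hiidmem; simp at hiidmem
          · rw [hq] at hiidmem hlen
            simp only [List.length_cons] at hlen
            have ht : t = [] := List.length_eq_zero_iff.1 (by omega)
            subst ht
            simp only [List.mem_singleton] at hiidmem
            rw [hiidmem]
        by_cases hc : g.contains (pvFieldA r "item_name") = true
        · -- seen before: the set is already the singleton, both steps are identities
          have hi : (g.get? (pvFieldA r "item_name")).isSome := by
            rw [← PySem.Dict.contains_eq_isSome_get?]; exact hc
          rcases Option.isSome_iff_exists.1 hi with ⟨s, hsv⟩
          have hmem : (pvFieldA r "item_name", s) ∈ g.items :=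
            PySem.Dict.mem_items_of_get?_eq_some g hsv
          have hsd : g.getD (pvFieldA r "item_name") PySem.Set.empty = s :=
            PySem.Dict.getD_of_get?_eq_some g PySem.Set.empty hsv
          have hsne : s ≠ [] := (hg.2 _ hmem).1
          have hsnd : s.Nodup := (hg.2 _ hmem).2
          have hssub : s ⊆ [pvFieldA r "item_id"] := fun x hx => by
            have := hsub (pvSet_subset_add _ _ (hsd ▸ hx))
            rwa [hgfs] at this
          have hseq : s = [pvFieldA r "item_id"] := by
            rcases s with _ | ⟨x, t⟩
            · exact absurd rfl hsne
            · have hx : x = pvFieldA r "item_id" := by simpa using hssub List.mem_cons_self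
              have ht : t = [] := by
                rcases t with _ | ⟨y, u⟩
                · rfl
                · have hy : y = pvFieldA r "item_id" := by
                    simpa using hssub (List.mem_cons_of_mem _ List.mem_cons_self)
                  rw [hx, hy] at hsnd; simp at hsnd
              rw [hx, ht]
          have hgstep : pvGroupsStepA g r = g := by
            unfold pvGroupsStepA
            rw [if_pos hval, hsd, hseq, pvSet_add_of_mem _ _ (by simp)]
            exact pvInsert_self_of_mem_items g _ _ hg.1 (hseq ▸ hmem)
          have himem : (pvFieldA r "item_name", pvFieldA r "item_id") ∈ o.items := by
            rw [ho]
            refine List.mem_filterMap.2 ⟨(pvFieldA r "item_name", s), hmem, ?_⟩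
            simp only [pvPickAmb]
            rw [if_neg ha, hseq]
            rfl
          have honodup : o.keys.Nodup := by
            have hgk : (g.items.map Prod.fst).Nodup := by
              simpa [PySem.Dict.keys] using hg.1
            have : (o.items.map Prod.fst).Nodup := by
              rw [ho]; exact (pvKeys_filterMap amb g.items).nodup hgk
            simpa [PySem.Dict.keys] using this
          have hostep : o.insert (pvFieldA r "item_name") (pvFieldA r "item_id") = o :=
            pvInsert_self_of_mem_items o _ _ honodup himem
          rw [hout, hostep]
          rw [hgstep] at hgf
          exact ih g o hg ho hgf
        · -- fresh name: both dicts append the new entry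
          have hcf : g.contains (pvFieldA r "item_name") = false := by simpa using hc
          have hgstep_items : (pvGroupsStepA g r).items
              = g.items ++ [(pvFieldA r "item_name",
                  PySem.Set.add PySem.Set.empty (pvFieldA r "item_id"))] := by
            unfold pvGroupsStepA
            rw [if_pos hval, PySem.Dict.getD_of_not_contains g PySem.Set.empty hcf]
            exact PySem.Dict.items_insert_of_not_contains g _ hcf
          have honc : o.contains (pvFieldA r "item_name") = false := by
            rw [← Bool.not_eq_true]
            intro hco
            have hk := (PySem.Dict.contains_iff_mem_keys o _).1 hco
            have hmemg : pvFieldA r "item_name" ∈ g.items.map Prod.fst :=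
              (pvKeys_filterMap amb g.items).subset
                (by simpa [PySem.Dict.keys, ho] using hk)
            have hct : g.contains (pvFieldA r "item_name") = true :=
              (PySem.Dict.contains_iff_mem_keys g _).2 (by simpa [PySem.Dict.keys] using hmemg)
            rw [hcf] at hct
            cases hct
          have hostep_items : (o.insert (pvFieldA r "item_name") (pvFieldA r "item_id")).items
              = o.items ++ [(pvFieldA r "item_name", pvFieldA r "item_id")] :=
            PySem.Dict.items_insert_of_not_contains o _ honc
          rw [hout]
          refine ih (pvGroupsStepA g r) _ (pvGInv_step g r hg) ?_ hgf
          rw [hostep_items, hgstep_items, List.filterMap_append, ho]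
          congr 1
          simp only [List.filterMap_cons, List.filterMap_nil, pvPickAmb]
          rw [if_neg ha]
          rfl
    · -- invalid row (empty name or id): both loops skip it
      have hout : pvOutStepA amb o r = o := by
        unfold pvOutStepA
        rw [if_pos]
        by_cases h1 : pvFieldA r "item_name" = ""
        · exact Or.inl h1
        · refine Or.inr (Or.inl ?_)
          by_contra h2
          exact hval ⟨h1, h2⟩
      have hgstep : pvGroupsStepA g r = g := by
        unfold pvGroupsStepA; rw [if_neg hval]
      rw [hgstep] at hgf
      rw [hout]
      exact ih g o hg ho hgf

-- a name outside the ambiguity set has at most one collected id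
theorem pvAmbNotMem (gf : PySem.Dict String (PySem.Set String)) (n : String)
    (h : PySem.Set.contains
      (PySem.Set.ofList (gf.items.filterMap (fun p => if 1 < PySem.Set.len p.2 then some p.1 else none))) n
      = false) : (gf.getD n PySem.Set.empty).length ≤ 1 := by
  by_contra hgt
  simp only [not_le] at hgt
  by_cases hc : gf.contains n = true
  · have hi : (gf.get? n).isSome := by rw [← PySem.Dict.contains_eq_isSome_get?]; exact hc
    rcases Option.isSome_iff_exists.1 hi with ⟨s, hsv⟩
    have hsd : gf.getD n PySem.Set.empty = s := PySem.Dict.getD_of_get?_eq_some gf PySem.Set.empty hsv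
    rw [hsd] at hgt
    have hmem : n ∈ gf.items.filterMap (fun p => if 1 < PySem.Set.len p.2 then some p.1 else none) :=
      List.mem_filterMap.2 ⟨(n, s), PySem.Dict.mem_items_of_get?_eq_some gf hsv,
        by rw [if_pos (by simp only [PySem.Set.len]; exact_mod_cast hgt)]⟩
    have : PySem.Set.contains
        (PySem.Set.ofList (gf.items.filterMap (fun p => if 1 < PySem.Set.len p.2 then some p.1 else none))) n
        = true := by
      simp only [PySem.Set.contains, List.contains_iff_mem]
      exact (PySem.Set.mem_ofList _ _).2 hmem
    rw [h] at this; cases this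
  · rw [PySem.Dict.getD_of_not_contains gf PySem.Set.empty (by simpa using hc)] at hgt
    simp at hgt

theorem build_unique_item_name_to_id_spec : Claim_equal_build_unique_item_name_to_id := by
  intro rows _
  unfold Spec_build_unique_item_name_to_id build_unique_item_name_to_id build_unique_item_name_to_id_alt
  rw [pvStepB_eq_StepA]
  have hginv : pvGInv (rows.foldl pvGroupsStepA PySem.Dict.empty) :=
    pvGInv_foldl rows PySem.Dict.empty ⟨by simp [PySem.Dict.empty, PySem.Dict.keys], by simp [PySem.Dict.empty]⟩
  have hmain := pvMain (rows.foldl pvGroupsStepA PySem.Dict.empty) (ambiguous_item_names rows)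
    (fun n hn => pvAmbNotMem _ n hn) rows PySem.Dict.empty PySem.Dict.empty
    ⟨by simp [PySem.Dict.empty, PySem.Dict.keys], by simp [PySem.Dict.empty]⟩
    (by simp [PySem.Dict.empty]) rfl
  rw [hmain]
  apply List.filterMap_congr
  intro p hp
  rcases p with ⟨nm, s⟩
  have hsd : (rows.foldl pvGroupsStepA PySem.Dict.empty).getD nm PySem.Set.empty = s :=
    PySem.Dict.getD_of_mem_items _ hp hginv.1 PySem.Set.empty
  have hsne : s ≠ [] := (hginv.2 _ hp).1
  by_cases hgt : 1 < s.length
  · -- ambiguous entry: dropped on both sides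
    have hcamb : PySem.Set.contains (ambiguous_item_names rows) nm = true := by
      unfold ambiguous_item_names
      simp only [PySem.Set.contains, List.contains_iff_mem]
      refine (PySem.Set.mem_ofList _ _).2 (List.mem_filterMap.2 ⟨(nm, s), hp, ?_⟩)
      rw [if_pos (by simp only [PySem.Set.len]; exact_mod_cast hgt)]
    simp only [pvPickAmb]
    rw [if_pos hcamb, if_neg (by simp only [PySem.Set.len]; omega)]
  · -- singleton entry: kept with its sole id on both sides
    have hlen1 : s.length = 1 := by
      rcases s with _ | ⟨x, t⟩
      · exact absurd rfl hsne
      · simp only [List.length_cons] at hgt ⊢; omega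
    have hcamb : PySem.Set.contains (ambiguous_item_names rows) nm = false := by
      rw [← Bool.not_eq_true]
      intro hct
      unfold ambiguous_item_names at hct
      simp only [PySem.Set.contains, List.contains_iff_mem] at hct
      have hmem := (PySem.Set.mem_ofList _ _).1 hct
      rcases List.mem_filterMap.1 hmem with ⟨⟨nm', s'⟩, hps, hsome⟩
      split at hsome
      · rename_i hbig
        have hnm : nm' = nm := by simpa using hsome
        subst hnm
        have : s' = s := by
          have h1 := PySem.Dict.getD_of_mem_items _ hps hginv.1 PySem.Set.empty
          rw [hsd] at h1; exact h1.symm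
        subst this
        simp only [PySem.Set.len] at hbig
        omega
      · cases hsome
    simp only [pvPickAmb]
    rw [if_neg (by rw [hcamb]; exact Bool.false_ne_true),
      if_pos (by simp only [PySem.Set.len]; exact_mod_cast hlen1)]
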